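-- pv_equiv track=rewrite | github.com/cry999/AtCoder | beginner-contest/085/C.py | otoshidama
-- ===== SOURCE A (Python) =====
-- def otoshidama(N: int, Y: int)->int:
--     Y //= 1000
--
--     a0 = (Y-N) % 4
--     b0 = ((Y-N) - 9 * a0) // 4
--
--     m_min = max(- a0//4,  -(N-b0)//9)
--     m_max = min((N-a0)//4, b0//9)+1
--
--     for m in range(m_min, m_max):
--         a = a0 + 4*m
--         b = b0 - 9*m
--         c = N - a - b
--
--         if a < 0 or N < a:
--             continue
--         if b < 0 or N < b:
--             continue
--         if c < 0 or N < c: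
--             continue
--
--         return (a, b, c)
--
--     return (-1, -1, -1)
-- ===== SOURCE B (Python) =====
-- def otoshidama(N: int, Y: int) -> int:
--     # count of thousands to distribute beyond one 1000-bill per bill: 9a + 4b = k
--     k = Y // 1000 - N
--     # smallest admissible a: a >= 0, 5a >= k - 4N (so that b <= N - a), a == k (mod 4)
--     lo = max(0, -((4 * N - k) // 5))
--     lo += (k - lo) % 4
--     if lo <= N and 9 * lo <= k:
--         b = (k - 9 * lo) // 4
--         return (lo, b, N - lo - b)
--     return (-1, -1, -1)
-- ===== Notes on version B (the rewrite author's own statement) =====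
-- stated objective: alternative
-- what changed: Replaces A's loop over the Diophantine parameter m (scanning a computed range and re-checking all bounds each step) with a direct closed-form solution: compute the smallest admissible 10000-bill count a for 9a+4b = Y//1000 - N by ceiling division and a mod-4 lift, with no loop at all.
import Mathlib
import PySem

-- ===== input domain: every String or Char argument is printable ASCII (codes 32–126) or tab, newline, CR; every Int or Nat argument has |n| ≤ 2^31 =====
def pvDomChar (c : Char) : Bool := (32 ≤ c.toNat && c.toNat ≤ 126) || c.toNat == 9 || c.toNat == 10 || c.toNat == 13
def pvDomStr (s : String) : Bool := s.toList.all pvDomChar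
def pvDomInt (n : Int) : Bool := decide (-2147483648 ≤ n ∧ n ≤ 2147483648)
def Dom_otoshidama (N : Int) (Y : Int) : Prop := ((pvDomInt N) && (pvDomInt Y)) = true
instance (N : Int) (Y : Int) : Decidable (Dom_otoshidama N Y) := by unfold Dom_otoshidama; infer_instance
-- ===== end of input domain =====

-- B replaces A's parameter-scanning loop by a closed-form O(1) solution of 9a+4b = Y//1000 - N (smallest admissible a directly).

-- ===== PORT A =====
-- the for-m loop of A: return at the first m passing all checks, else (-1,-1,-1)
def otoA_loop (N a0 b0 : Int) : List Int → Int × Int × Int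
  | [] => (-1, -1, -1)
  | m :: ms =>
    let a := a0 + 4 * m
    let b := b0 - 9 * m
    let c := N - a - b
    if a < 0 ∨ N < a then otoA_loop N a0 b0 ms
    else if b < 0 ∨ N < b then otoA_loop N a0 b0 ms
    else if c < 0 ∨ N < c then otoA_loop N a0 b0 ms
    else (a, b, c)

def otoshidama (N : Int) (Y : Int) : Int × Int × Int :=
  let y := PySem.Int.floordiv Y 1000
  let a0 := PySem.Int.mod (y - N) 4
  let b0 := PySem.Int.floordiv ((y - N) - 9 * a0) 4
  let mMin := max (PySem.Int.floordiv (-a0) 4) (PySem.Int.floordiv (-(N - b0)) 9)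
  let mMax := min (PySem.Int.floordiv (N - a0) 4) (PySem.Int.floordiv b0 9) + 1
  otoA_loop N a0 b0 (PySem.List.pyRange mMin mMax 1)

-- ===== PORT B =====
def otoshidama_alt (N : Int) (Y : Int) : Int × Int × Int :=
  let k := PySem.Int.floordiv Y 1000 - N
  let lo0 := max 0 (-(PySem.Int.floordiv (4 * N - k) 5))
  let lo := lo0 + PySem.Int.mod (k - lo0) 4
  if lo ≤ N ∧ 9 * lo ≤ k then
    let b := PySem.Int.floordiv (k - 9 * lo) 4
    (lo, b, N - lo - b)
  else (-1, -1, -1)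

-- ===== PRECONDITION & SPEC =====
def Spec_otoshidama (N : Int) (Y : Int) (out : Int × Int × Int) : Prop := out = otoshidama_alt N Y
instance (N : Int) (Y : Int) (out : Int × Int × Int) : Decidable (Spec_otoshidama N Y out) := by unfold Spec_otoshidama; infer_instance

-- ===== CLAIM (what is proved, stated in full; the proofs are below) =====
def Claim_equal_otoshidama : Prop := ∀ (N : Int) (Y : Int), Dom_otoshidama N Y → Spec_otoshidama N Y (otoshidama N Y)

-- ===== LEMMAS AND PROOFS =====

-- a valid answer: a 10000-bills count a and 5000-count b passing all of A's range checks, with 9a+4b = k (k = y - N)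
def Good (N k a b : Int) : Prop :=
  0 ≤ a ∧ a ≤ N ∧ 0 ≤ b ∧ b ≤ N ∧ 0 ≤ N - a - b ∧ N - a - b ≤ N ∧ 9 * a + 4 * b = k

-- the common characterization both loops satisfy: the Good pair with least a, or (-1,-1,-1)
def IsAns (N k : Int) (r : Int × Int × Int) : Prop :=
  (r = (-1, -1, -1) ∧ ∀ a b, ¬ Good N k a b) ∨
  (∃ a b, r = (a, b, N - a - b) ∧ Good N k a b ∧ ∀ a' b', Good N k a' b' → a ≤ a')

theorem isAns_unique (N k : Int) (r1 r2 : Int × Int × Int)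
    (h1 : IsAns N k r1) (h2 : IsAns N k r2) : r1 = r2 := by
  rcases h1 with ⟨e1, n1⟩ | ⟨a1, b1, e1, g1, m1⟩ <;>
    rcases h2 with ⟨e2, n2⟩ | ⟨a2, b2, e2, g2, m2⟩
  · rw [e1, e2]
  · exact absurd g2 (n1 _ _)
  · exact absurd g1 (n2 _ _)
  · have ha : a1 = a2 := le_antisymm (m1 _ _ g2) (m2 _ _ g1)
    have hb : b1 = b2 := by
      have := g1.2.2.2.2.2.2; have := g2.2.2.2.2.2.2; omega
    rw [e1, e2, ha, hb]

-- the check of A's loop body at parameter m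
def OkM (N a0 b0 m : Int) : Prop :=
  0 ≤ a0 + 4 * m ∧ a0 + 4 * m ≤ N ∧ 0 ≤ b0 - 9 * m ∧ b0 - 9 * m ≤ N ∧
  0 ≤ N - (a0 + 4 * m) - (b0 - 9 * m) ∧ N - (a0 + 4 * m) - (b0 - 9 * m) ≤ N

-- every Good pair lies on A's parametrized line
theorem good_param (N k a0 b0 a b : Int) (hk : 9 * a0 + 4 * b0 = k)
    (hg : Good N k a b) : ∃ m, a = a0 + 4 * m ∧ b = b0 - 9 * m := by
  obtain ⟨_, _, _, _, _, _, hs⟩ := hg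
  exact ⟨(a - a0) / 4, by omega, by omega⟩

theorem okM_good (N k a0 b0 m : Int) (hk : 9 * a0 + 4 * b0 = k) (h : OkM N a0 b0 m) :
    Good N k (a0 + 4 * m) (b0 - 9 * m) := by
  obtain ⟨h1, h2, h3, h4, h5, h6⟩ := h
  exact ⟨h1, h2, h3, h4, h5, h6, by omega⟩

theorem good_okM (N k a0 b0 m : Int) (h : Good N k (a0 + 4 * m) (b0 - 9 * m)) :
    OkM N a0 b0 m := by
  obtain ⟨h1, h2, h3, h4, h5, h6, _⟩ := h
  exact ⟨h1, h2, h3, h4, h5, h6⟩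

theorem otoA_loop_cons (N a0 b0 m : Int) (ms : List Int) :
    otoA_loop N a0 b0 (m :: ms) =
      if a0 + 4 * m < 0 ∨ N < a0 + 4 * m then otoA_loop N a0 b0 ms
      else if b0 - 9 * m < 0 ∨ N < b0 - 9 * m then otoA_loop N a0 b0 ms
      else if N - (a0 + 4 * m) - (b0 - 9 * m) < 0 ∨ N < N - (a0 + 4 * m) - (b0 - 9 * m) then
        otoA_loop N a0 b0 ms
      else (a0 + 4 * m, b0 - 9 * m, N - (a0 + 4 * m) - (b0 - 9 * m)) := rfl

-- A's loop, run over [lo, hi), computes IsAns when no OkM parameter lies below lo or at/after hi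
theorem loopA_isAns (N k a0 b0 hi : Int) (ha4 : 0 ≤ a0 ∧ a0 < 4) (hk : 9 * a0 + 4 * b0 = k)
    (hhi : ∀ m, OkM N a0 b0 m → m < hi) :
    ∀ lo, (∀ m, OkM N a0 b0 m → lo ≤ m) →
      IsAns N k (otoA_loop N a0 b0 (PySem.List.pyRange lo hi 1)) := by
  intro lo
  by_cases hle : hi ≤ lo
  · intro hlo
    rw [PySem.List.pyRange_one_eq_nil hle]
    left
    refine ⟨rfl, fun a b hg => ?_⟩
    obtain ⟨m, hma, hmb⟩ := good_param N k a0 b0 a b hk hg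
    have hok : OkM N a0 b0 m := good_okM N k a0 b0 m (hma ▸ hmb ▸ hg)
    have := hhi m hok; have := hlo m hok; omega
  · replace hle : lo < hi := by omega
    have hterm : ((hi - (lo + 1)).toNat < (hi - lo).toNat) := by omega
    intro hlo
    rw [PySem.List.pyRange_one_cons hle, otoA_loop_cons]
    by_cases hok : OkM N a0 b0 lo
    · obtain ⟨h1, h2, h3, h4, h5, h6⟩ := hok
      rw [if_neg (by omega), if_neg (by omega), if_neg (by omega)]
      right
      refine ⟨a0 + 4 * lo, b0 - 9 * lo, rfl,
        okM_good N k a0 b0 lo hk ⟨h1, h2, h3, h4, h5, h6⟩, fun a' b' hg' => ?_⟩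
      obtain ⟨m', hma, hmb⟩ := good_param N k a0 b0 a' b' hk hg'
      have hok' : OkM N a0 b0 m' := good_okM N k a0 b0 m' (hma ▸ hmb ▸ hg')
      have := hlo m' hok'; omega
    · have hrec : ∀ m, OkM N a0 b0 m → lo + 1 ≤ m := by
        intro m hm
        have := hlo m hm
        rcases eq_or_lt_of_le this with heq | h
        · exact absurd (heq ▸ hm) hok
        · omega
      have ih := loopA_isAns N k a0 b0 hi ha4 hk hhi (lo + 1) hrec
      unfold OkM at hok
      split_ifs with c1 c2 c3
      · exact ih
      · exact ih
      · exact ih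
      · exact absurd ⟨by omega, by omega, by omega, by omega, by omega, by omega⟩ hok
termination_by lo => (hi - lo).toNat

theorem otoshidama_isAns_A (N Y : Int) :
    IsAns N (PySem.Int.floordiv Y 1000 - N) (otoshidama N Y) := by
  have hmod : ∀ x : Int, PySem.Int.mod x 4 = x % 4 :=
    fun x => PySem.Int.mod_eq_emod_of_pos (by norm_num)
  have hdiv4 : ∀ x : Int, PySem.Int.floordiv x 4 = x / 4 :=
    fun x => PySem.Int.floordiv_eq_ediv_of_pos (by norm_num)
  have hdiv9 : ∀ x : Int, PySem.Int.floordiv x 9 = x / 9 :=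
    fun x => PySem.Int.floordiv_eq_ediv_of_pos (by norm_num)
  unfold otoshidama
  simp only [hmod, hdiv4, hdiv9]
  apply loopA_isAns
  · constructor <;> omega
  · omega
  · intro m hm
    obtain ⟨h1, h2, h3, h4, h5, h6⟩ := hm
    omega
  · intro m hm
    obtain ⟨h1, h2, h3, h4, h5, h6⟩ := hm
    omega

theorem otoshidama_isAns_B (N Y : Int) :
    IsAns N (PySem.Int.floordiv Y 1000 - N) (otoshidama_alt N Y) := by
  have hmod4 : ∀ x : Int, PySem.Int.mod x 4 = x % 4 :=
    fun x => PySem.Int.mod_eq_emod_of_pos (by norm_num)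
  have hdiv4 : ∀ x : Int, PySem.Int.floordiv x 4 = x / 4 :=
    fun x => PySem.Int.floordiv_eq_ediv_of_pos (by norm_num)
  have hdiv5 : ∀ x : Int, PySem.Int.floordiv x 5 = x / 5 :=
    fun x => PySem.Int.floordiv_eq_ediv_of_pos (by norm_num)
  obtain ⟨k, hk⟩ : ∃ k, PySem.Int.floordiv Y 1000 - N = k := ⟨_, rfl⟩
  unfold otoshidama_alt
  simp only [hmod4, hdiv4, hdiv5, hk]
  split_ifs with hcond
  · right
    refine ⟨_, _, rfl, ⟨?_, ?_, ?_, ?_, ?_, ?_, ?_⟩, ?_⟩ <;>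
      try omega
    intro a' b' hg'
    obtain ⟨h1, h2, h3, h4, h5, h6, h7⟩ := hg'
    omega
  · left
    refine ⟨rfl, fun a' b' hg' => ?_⟩
    obtain ⟨h1, h2, h3, h4, h5, h6, h7⟩ := hg'
    have haL : max 0 (-((4 * N - k) / 5)) ≤ a' := max_le h1 (by omega)
    have hdvd : (4 : Int) ∣ (k - a') := ⟨2 * a' + b', by omega⟩
    obtain ⟨M, hMeq⟩ : ∃ M, max 0 (-((4 * N - k) / 5)) = M := ⟨_, rfl⟩
    rw [hMeq] at hcond haL
    obtain ⟨r, hr⟩ : ∃ r, (k - M) % 4 = r := ⟨_, rfl⟩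
    have hr0 : 0 ≤ r ∧ r < 4 := by rw [← hr]; constructor <;> omega
    have hrd : (4 : Int) ∣ (k - M - r) := by rw [← hr]; omega
    rw [hr] at hcond
    obtain ⟨c, hc⟩ := hdvd
    obtain ⟨s, hs⟩ := hrd
    omega

-- ===== VERDICT (by name: the statement is the Claim_ definition above) =====
theorem otoshidama_spec : Claim_equal_otoshidama := by
  intro N Y _
  exact isAns_unique N (PySem.Int.floordiv Y 1000 - N) _ _
    (otoshidama_isAns_A N Y) (otoshidama_isAns_B N Y)
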